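-- pv_equiv track=rewrite | github.com/alemiherbert/gadgets | data/upload_batch.py | determine_product_mapping
-- ===== SOURCE A (Python) =====
-- WC_TO_NEW_CATEGORY = {
--     "mobile-phones-smartphones": "phones-wearables",
--     "smart-watches": "phones-wearables",
--     "smart-tvs": "tvs-displays",
--     "digital-tvs": "tvs-displays",
--     "projectors": "tvs-displays",
--     "commercial-displays": "tvs-displays",
--     "tv-accessories": "tvs-displays",
--     "soundbars": "audio",
--     "portable-speakers": "audio",
--     "party-speakers-trolleys": "audio",
--     "home-theatre-systems": "audio",
--     "headphones-earphones": "audio",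
--     "microphones": "audio",
--     "laptops-computers": "computing-gaming",
--     "monitors": "computing-gaming",
--     "printers-scanners": "computing-gaming",
--     "gaming": "computing-gaming",
--     "cameras": "cameras",
--     "lenses-tripods-accessories": "cameras",
--     "power-banks": "accessories-power",
--     "chargers-inverters": "accessories-power",
--     "generators": "accessories-power",
--     "solar-lighting": "accessories-power",
--     "cables-adapters": "accessories-power",
--     "car-accessories": "accessories-power",
--     "health-care-products": "accessories-power",
-- }
--
-- WC_TO_NEW_SUBCATEGORY = {
--     "mobile-phones-smartphones": ("phones-wearables", "smartphones"),
--     "smart-watches": ("phones-wearables", "smart-watches"),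
--     "smart-tvs": ("tvs-displays", "smart-tvs"),
--     "digital-tvs": ("tvs-displays", "digital-tvs"),
--     "projectors": ("tvs-displays", "projectors"),
--     "commercial-displays": ("tvs-displays", "commercial-displays"),
--     "tv-accessories": ("tvs-displays", "tv-accessories"),
--     "soundbars": ("audio", "soundbars"),
--     "portable-speakers": ("audio", "portable-speakers"),
--     "party-speakers-trolleys": ("audio", "party-speakers"),
--     "home-theatre-systems": ("audio", "home-theatre"),
--     "headphones-earphones": ("audio", "headphones"),
--     "microphones": ("audio", "microphones"),
--     "laptops-computers": ("computing-gaming", "laptops-computers"),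
--     "monitors": ("computing-gaming", "monitors"),
--     "printers-scanners": ("computing-gaming", "printers-scanners"),
--     "gaming": ("computing-gaming", "gaming"),
--     "cameras": ("cameras", "digital-cameras"),
--     "lenses-tripods-accessories": ("cameras", "lenses-accessories"),
--     "power-banks": ("accessories-power", "power-banks"),
--     "chargers-inverters": ("accessories-power", "chargers-inverters"),
--     "generators": ("accessories-power", "generators"),
--     "solar-lighting": ("accessories-power", "solar-lighting"),
--     "cables-adapters": ("accessories-power", "cables-adapters"),
--     "car-accessories": ("accessories-power", "car-accessories"),
--     "health-care-products": ("accessories-power", "health-wellness"),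
-- }
--
-- def determine_product_mapping(product, category_ids, subcat_ids):
--     """Map WC categories to new category/subcategory."""
--     wc_cat_slugs = [c["slug"] for c in product.get("categories", [])]
--
--     new_cat_slug = None
--     new_subcat_slug = None
--
--     for wc_slug in wc_cat_slugs:
--         if wc_slug in WC_TO_NEW_CATEGORY:
--             new_cat_slug = WC_TO_NEW_CATEGORY[wc_slug]
--             break
--
--     for wc_slug in wc_cat_slugs:
--         if wc_slug in WC_TO_NEW_SUBCATEGORY:
--             _, new_subcat_slug = WC_TO_NEW_SUBCATEGORY[wc_slug]
--             break
--
--     if not new_cat_slug: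
--         new_cat_slug = "accessories-power"
--
--     cat_id = category_ids.get(new_cat_slug)
--     subcat_id = subcat_ids.get(new_subcat_slug) if new_subcat_slug else None
--
--     return cat_id, subcat_id
-- ===== SOURCE B (Python) =====
-- WC_TO_NEW_SUBCATEGORY = {
--     "mobile-phones-smartphones": ("phones-wearables", "smartphones"),
--     "smart-watches": ("phones-wearables", "smart-watches"),
--     "smart-tvs": ("tvs-displays", "smart-tvs"),
--     "digital-tvs": ("tvs-displays", "digital-tvs"),
--     "projectors": ("tvs-displays", "projectors"),
--     "commercial-displays": ("tvs-displays", "commercial-displays"),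
--     "tv-accessories": ("tvs-displays", "tv-accessories"),
--     "soundbars": ("audio", "soundbars"),
--     "portable-speakers": ("audio", "portable-speakers"),
--     "party-speakers-trolleys": ("audio", "party-speakers"),
--     "home-theatre-systems": ("audio", "home-theatre"),
--     "headphones-earphones": ("audio", "headphones"),
--     "microphones": ("audio", "microphones"),
--     "laptops-computers": ("computing-gaming", "laptops-computers"),
--     "monitors": ("computing-gaming", "monitors"),
--     "printers-scanners": ("computing-gaming", "printers-scanners"),
--     "gaming": ("computing-gaming", "gaming"),
--     "cameras": ("cameras", "digital-cameras"),
--     "lenses-tripods-accessories": ("cameras", "lenses-accessories"),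
--     "power-banks": ("accessories-power", "power-banks"),
--     "chargers-inverters": ("accessories-power", "chargers-inverters"),
--     "generators": ("accessories-power", "generators"),
--     "solar-lighting": ("accessories-power", "solar-lighting"),
--     "cables-adapters": ("accessories-power", "cables-adapters"),
--     "car-accessories": ("accessories-power", "car-accessories"),
--     "health-care-products": ("accessories-power", "health-wellness"),
-- }
--
--
-- def determine_product_mapping(product, category_ids, subcat_ids):
--     """Map WC categories to new category/subcategory.
--
--     Single pass: the first slug present in WC_TO_NEW_SUBCATEGORY yields both the
--     new category and subcategory from one tuple (the category dict is redundant)."""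
--     for c in product.get("categories", []):
--         mapping = WC_TO_NEW_SUBCATEGORY.get(c["slug"])
--         if mapping is not None:
--             new_cat_slug, new_subcat_slug = mapping
--             return category_ids.get(new_cat_slug), subcat_ids.get(new_subcat_slug)
--     return category_ids.get("accessories-power"), None
-- ===== Notes on version B (the rewrite author's own statement) =====
-- stated objective: simpler
-- what changed: Replaces A's two independent scans over the slug list (one per mapping dict) with a single early-returning loop over the categories that takes both the new category and subcategory from one WC_TO_NEW_SUBCATEGORY tuple, dropping the redundant WC_TO_NEW_CATEGORY dict entirely.
import Mathlib
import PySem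

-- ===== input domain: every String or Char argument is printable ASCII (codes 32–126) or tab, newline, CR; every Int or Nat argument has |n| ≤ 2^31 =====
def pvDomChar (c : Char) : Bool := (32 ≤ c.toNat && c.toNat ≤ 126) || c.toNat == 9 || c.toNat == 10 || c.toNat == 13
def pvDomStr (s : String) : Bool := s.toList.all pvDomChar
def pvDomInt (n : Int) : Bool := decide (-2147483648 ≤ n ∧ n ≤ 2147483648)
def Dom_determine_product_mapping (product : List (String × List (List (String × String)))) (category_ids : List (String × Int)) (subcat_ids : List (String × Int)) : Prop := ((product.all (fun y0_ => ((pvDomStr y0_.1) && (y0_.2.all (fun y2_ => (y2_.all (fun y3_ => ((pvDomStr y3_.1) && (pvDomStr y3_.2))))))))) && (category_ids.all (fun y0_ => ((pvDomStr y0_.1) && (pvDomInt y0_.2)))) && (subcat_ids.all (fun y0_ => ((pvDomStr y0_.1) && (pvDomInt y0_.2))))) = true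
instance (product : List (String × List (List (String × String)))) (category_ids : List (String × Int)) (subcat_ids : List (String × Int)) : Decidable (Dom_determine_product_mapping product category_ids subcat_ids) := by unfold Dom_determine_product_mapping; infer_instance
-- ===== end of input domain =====

-- B replaces A's two independent scans with one early-returning loop over the categories,
-- reading both new slugs from a single WC_TO_NEW_SUBCATEGORY tuple (WC_TO_NEW_CATEGORY is redundant): simpler.


-- ===== PORT A =====
def WC_TO_NEW_CATEGORY : PySem.Dict String String := PySem.Dict.mk [
  ("mobile-phones-smartphones", "phones-wearables"),
  ("smart-watches", "phones-wearables"),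
  ("smart-tvs", "tvs-displays"),
  ("digital-tvs", "tvs-displays"),
  ("projectors", "tvs-displays"),
  ("commercial-displays", "tvs-displays"),
  ("tv-accessories", "tvs-displays"),
  ("soundbars", "audio"),
  ("portable-speakers", "audio"),
  ("party-speakers-trolleys", "audio"),
  ("home-theatre-systems", "audio"),
  ("headphones-earphones", "audio"),
  ("microphones", "audio"),
  ("laptops-computers", "computing-gaming"),
  ("monitors", "computing-gaming"),
  ("printers-scanners", "computing-gaming"),
  ("gaming", "computing-gaming"),
  ("cameras", "cameras"),
  ("lenses-tripods-accessories", "cameras"),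
  ("power-banks", "accessories-power"),
  ("chargers-inverters", "accessories-power"),
  ("generators", "accessories-power"),
  ("solar-lighting", "accessories-power"),
  ("cables-adapters", "accessories-power"),
  ("car-accessories", "accessories-power"),
  ("health-care-products", "accessories-power")]

def WC_TO_NEW_SUBCATEGORY : PySem.Dict String (String × String) := PySem.Dict.mk [
  ("mobile-phones-smartphones", ("phones-wearables", "smartphones")),
  ("smart-watches", ("phones-wearables", "smart-watches")),
  ("smart-tvs", ("tvs-displays", "smart-tvs")),
  ("digital-tvs", ("tvs-displays", "digital-tvs")),
  ("projectors", ("tvs-displays", "projectors")),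
  ("commercial-displays", ("tvs-displays", "commercial-displays")),
  ("tv-accessories", ("tvs-displays", "tv-accessories")),
  ("soundbars", ("audio", "soundbars")),
  ("portable-speakers", ("audio", "portable-speakers")),
  ("party-speakers-trolleys", ("audio", "party-speakers")),
  ("home-theatre-systems", ("audio", "home-theatre")),
  ("headphones-earphones", ("audio", "headphones")),
  ("microphones", ("audio", "microphones")),
  ("laptops-computers", ("computing-gaming", "laptops-computers")),
  ("monitors", ("computing-gaming", "monitors")),
  ("printers-scanners", ("computing-gaming", "printers-scanners")),
  ("gaming", ("computing-gaming", "gaming")),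
  ("cameras", ("cameras", "digital-cameras")),
  ("lenses-tripods-accessories", ("cameras", "lenses-accessories")),
  ("power-banks", ("accessories-power", "power-banks")),
  ("chargers-inverters", ("accessories-power", "chargers-inverters")),
  ("generators", ("accessories-power", "generators")),
  ("solar-lighting", ("accessories-power", "solar-lighting")),
  ("cables-adapters", ("accessories-power", "cables-adapters")),
  ("car-accessories", ("accessories-power", "car-accessories")),
  ("health-care-products", ("accessories-power", "health-wellness"))]

-- c["slug"]: KeyError when "slug" is missing (excluded by Pre_); the port uses "" as a total stand-in there
def pvSlug (c : List (String × String)) : String := ((PySem.Dict.mk c).get? "slug").getD ""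

-- A's first loop: first slug found in WC_TO_NEW_CATEGORY, then break
def pvFindCat : List String → Option String
  | [] => none
  | s :: rest => if WC_TO_NEW_CATEGORY.contains s then WC_TO_NEW_CATEGORY.get? s else pvFindCat rest

-- A's second loop: first slug found in WC_TO_NEW_SUBCATEGORY, keep the tuple's second component, then break
def pvFindSub : List String → Option String
  | [] => none
  | s :: rest => if WC_TO_NEW_SUBCATEGORY.contains s then (WC_TO_NEW_SUBCATEGORY.get? s).map Prod.snd else pvFindSub rest

def determine_product_mapping (product : List (String × List (List (String × String)))) (category_ids : List (String × Int)) (subcat_ids : List (String × Int)) : Option Int × Option Int :=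
  let wc_cat_slugs := ((PySem.Dict.mk product).getD "categories" []).map pvSlug
  let new_cat_slug := pvFindCat wc_cat_slugs
  let new_subcat_slug := pvFindSub wc_cat_slugs
  -- "if not new_cat_slug": None and "" are both falsy
  let cat_slug := match new_cat_slug with
    | none => "accessories-power"
    | some s => if s = "" then "accessories-power" else s
  let cat_id := (PySem.Dict.mk category_ids).get? cat_slug
  -- "subcat_ids.get(new_subcat_slug) if new_subcat_slug else None"
  let subcat_id := match new_subcat_slug with
    | none => none
    | some s => if s = "" then none else (PySem.Dict.mk subcat_ids).get? s
  (cat_id, subcat_id)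

-- ===== PORT B =====
-- B's single loop: first category whose slug WC_TO_NEW_SUBCATEGORY maps, returning the whole tuple
def pvFindMapping : List (List (String × String)) → Option (String × String)
  | [] => none
  | c :: rest => match WC_TO_NEW_SUBCATEGORY.get? (((PySem.Dict.mk c).get? "slug").getD "") with
    | some m => some m
    | none => pvFindMapping rest

def determine_product_mapping_alt (product : List (String × List (List (String × String)))) (category_ids : List (String × Int)) (subcat_ids : List (String × Int)) : Option Int × Option Int :=
  match pvFindMapping ((PySem.Dict.mk product).getD "categories" []) with
  | some (new_cat_slug, new_subcat_slug) =>
      ((PySem.Dict.mk category_ids).get? new_cat_slug, (PySem.Dict.mk subcat_ids).get? new_subcat_slug)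
  | none => ((PySem.Dict.mk category_ids).get? "accessories-power", none)

-- ===== PRECONDITION & SPEC =====
-- Pre_ excludes exactly the inputs where Python A raises KeyError: a dict in product["categories"] without a "slug" key.
def Pre_determine_product_mapping (product : List (String × List (List (String × String)))) (category_ids : List (String × Int)) (subcat_ids : List (String × Int)) : Prop :=
  (((PySem.Dict.mk product).getD "categories" []).all (fun c => (PySem.Dict.mk c).contains "slug")) = true
instance (product : List (String × List (List (String × String)))) (category_ids : List (String × Int)) (subcat_ids : List (String × Int)) : Decidable (Pre_determine_product_mapping product category_ids subcat_ids) := by unfold Pre_determine_product_mapping; infer_instance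

def pvWitness_determine_product_mapping : (List (String × List (List (String × String)))) × (List (String × Int)) × (List (String × Int)) :=
  ([("categories", [[("slug", "gaming")]])], [("computing-gaming", 4)], [("gaming", 7)])

def Spec_determine_product_mapping (product : List (String × List (List (String × String)))) (category_ids : List (String × Int)) (subcat_ids : List (String × Int)) (out : Option Int × Option Int) : Prop := out = determine_product_mapping_alt product category_ids subcat_ids
instance (product : List (String × List (List (String × String)))) (category_ids : List (String × Int)) (subcat_ids : List (String × Int)) (out : Option Int × Option Int) : Decidable (Spec_determine_product_mapping product category_ids subcat_ids out) := by unfold Spec_determine_product_mapping; infer_instance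

-- ===== CLAIM (what is proved, stated in full; the proofs are below) =====
def Claim_equal_determine_product_mapping : Prop := ∀ (product : List (String × List (List (String × String)))) (category_ids : List (String × Int)) (subcat_ids : List (String × Int)), Dom_determine_product_mapping product category_ids subcat_ids → Pre_determine_product_mapping product category_ids subcat_ids → Spec_determine_product_mapping product category_ids subcat_ids (determine_product_mapping product category_ids subcat_ids)

-- ===== LEMMAS AND PROOFS =====

-- first-match lookup commutes with projecting every value to its first component
theorem get?_mk_map_fst (l : List (String × (String × String))) (s : String) :
    (PySem.Dict.mk (l.map (fun p => (p.1, p.2.1)))).get? s = ((PySem.Dict.mk l).get? s).map Prod.fst := by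
  induction l with
  | nil => rfl
  | cons a t ih =>
    obtain ⟨k, v, w⟩ := a
    simp only [List.map_cons, PySem.Dict.get?_mk_cons]
    by_cases h : (k == s) = true <;> simp [h, ih]

-- the category dict IS the first projection of the subcategory dict
theorem cat_def : WC_TO_NEW_CATEGORY = PySem.Dict.mk (WC_TO_NEW_SUBCATEGORY.items.map (fun p => (p.1, p.2.1))) := by
  decide

theorem cat_eq_map_fst_sub (s : String) : WC_TO_NEW_CATEGORY.get? s = (WC_TO_NEW_SUBCATEGORY.get? s).map Prod.fst := by
  rw [cat_def]; exact get?_mk_map_fst _ s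

theorem contains_cat_eq_sub (s : String) : WC_TO_NEW_CATEGORY.contains s = WC_TO_NEW_SUBCATEGORY.contains s := by
  rw [PySem.Dict.contains_eq_isSome_get?, PySem.Dict.contains_eq_isSome_get?, cat_eq_map_fst_sub]
  cases WC_TO_NEW_SUBCATEGORY.get? s <;> rfl

theorem sub_values_ne_empty : ∀ p ∈ WC_TO_NEW_SUBCATEGORY.items, p.2.1 ≠ "" ∧ p.2.2 ≠ "" := by decide

theorem sub_get?_ne (s : String) (m : String × String) (h : WC_TO_NEW_SUBCATEGORY.get? s = some m) :
    m.1 ≠ "" ∧ m.2 ≠ "" :=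
  sub_values_ne_empty (s, m) (PySem.Dict.mem_items_of_get?_eq_some _ h)

theorem findCat_eq (cats : List (List (String × String))) :
    pvFindCat (cats.map pvSlug) = (pvFindMapping cats).map Prod.fst := by
  induction cats with
  | nil => rfl
  | cons c rest ih =>
    simp only [List.map_cons, pvFindCat, pvFindMapping, pvSlug]
    rw [contains_cat_eq_sub, PySem.Dict.contains_eq_isSome_get?, cat_eq_map_fst_sub]
    cases WC_TO_NEW_SUBCATEGORY.get? (((PySem.Dict.mk c).get? "slug").getD "") with
    | none => simpa using ih
    | some m => simp

theorem findSub_eq (cats : List (List (String × String))) :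
    pvFindSub (cats.map pvSlug) = (pvFindMapping cats).map Prod.snd := by
  induction cats with
  | nil => rfl
  | cons c rest ih =>
    simp only [List.map_cons, pvFindSub, pvFindMapping, pvSlug]
    rw [PySem.Dict.contains_eq_isSome_get?]
    cases WC_TO_NEW_SUBCATEGORY.get? (((PySem.Dict.mk c).get? "slug").getD "") with
    | none => simpa using ih
    | some m => simp

theorem findMapping_ne (cats : List (List (String × String))) (m : String × String)
    (h : pvFindMapping cats = some m) : m.1 ≠ "" ∧ m.2 ≠ "" := by
  induction cats with
  | nil => simp [pvFindMapping] at h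
  | cons c rest ih =>
    simp only [pvFindMapping] at h
    revert h
    cases hg : WC_TO_NEW_SUBCATEGORY.get? (((PySem.Dict.mk c).get? "slug").getD "") with
    | none => exact ih
    | some m' => intro h; cases h; exact sub_get?_ne _ _ hg

-- ===== VERDICT (by name: the statement is the Claim_ definition above) =====
theorem determine_product_mapping_spec : Claim_equal_determine_product_mapping := by
  intro product category_ids subcat_ids _ _
  unfold Spec_determine_product_mapping determine_product_mapping determine_product_mapping_alt
  simp only [findCat_eq, findSub_eq]
  cases hm : pvFindMapping ((PySem.Dict.mk product).getD "categories" []) with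
  | none => simp
  | some m =>
    obtain ⟨h1, h2⟩ := findMapping_ne _ _ hm
    cases m
    simp_all
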